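-- pv_equiv track=rewrite | github.com/jalabord/pretopologyx | example_lps_estimation.py | transform_numbers_to_sets
-- ===== SOURCE A (Python) =====
-- import itertools
--
-- def transform_numbers_to_sets(conj_forbidden, number_neighs):
--     fmt = '0' + str(number_neighs) + 'b'
--     forbidden_conjs = list()
--     for conj in conj_forbidden:
--         # we identified the sets used from their number representation
--         new_set = set()
--         for el, i in enumerate(format(int(conj), fmt)[::-1]):
--             if i == '1':
--                 new_set.add(el)
--         subset = False
--         for s in forbidden_conjs:
--             if new_set.issubset(s):
--                 subset = True
--                 break
--         if not subset:
--             forbidden_conjs[:] = itertools.filterfalse(lambda x: x.issubset(new_set), forbidden_conjs)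
--             forbidden_conjs.append(new_set)
--     return forbidden_conjs
-- ===== SOURCE B (Python) =====
-- def transform_numbers_to_sets(conj_forbidden, number_neighs):
--     fmt = '0' + str(number_neighs) + 'b'
--     # phase 1: decode every number once, preserving input order
--     sets = [{el for el, i in enumerate(format(int(conj), fmt)[::-1]) if i == '1'}
--             for conj in conj_forbidden]
--     # phase 2: keep each set that has no proper superset anywhere, first occurrence only
--     result = []
--     for s in sets:
--         if s not in result and not any(s < t for t in sets):
--             result.append(s)
--     return result
-- ===== Notes on version B (the rewrite author's own statement) =====
-- stated objective: alternative
-- what changed: A maintains a running antichain, testing each new set against it and rebuilding it with filterfalse; B decodes all numbers once and then filters: a set is kept iff no decoded set is a proper superset of it and it was not already emitted (first occurrences). Pre_ only excludes negative pad widths with a nonempty list, where A raises ValueError.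
import Mathlib
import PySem

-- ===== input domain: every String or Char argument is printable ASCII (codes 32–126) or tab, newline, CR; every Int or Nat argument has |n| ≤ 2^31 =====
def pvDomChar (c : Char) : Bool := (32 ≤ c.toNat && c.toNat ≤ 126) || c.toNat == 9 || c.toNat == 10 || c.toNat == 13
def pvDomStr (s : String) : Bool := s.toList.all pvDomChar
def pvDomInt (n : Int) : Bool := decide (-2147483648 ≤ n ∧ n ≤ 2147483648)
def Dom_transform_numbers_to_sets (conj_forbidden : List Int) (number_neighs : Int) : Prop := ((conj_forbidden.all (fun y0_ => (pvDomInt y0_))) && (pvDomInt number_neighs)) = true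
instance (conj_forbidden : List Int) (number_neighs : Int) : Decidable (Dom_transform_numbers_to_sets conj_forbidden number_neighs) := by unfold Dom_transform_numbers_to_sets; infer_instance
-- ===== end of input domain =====

-- B replaces A's incremental running-antichain maintenance by a two-phase "decode all numbers,
-- then keep the sets with no proper superset (first occurrences)" filter; objective: alternative decomposition.

-- ===== PORT A =====
-- tail-recursive enumerate (stack-safe in the interpreter), proved equal to
-- PySem.List.enumerate in pvEnum_eq below; both ports' 'enumerate(...)'
def pvEnum {α : Type} (l : List α) : List (Int × α) := l.zipIdx.map (fun p => ((p.2 : Int), p.1))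

-- format(int(conj), '0'+str(w)+'b') = zero-padded binary = PySem.Chars.zfill (PySem.Int.toBinChars conj) w
-- (exact: '0N b' format pads with '0' keeping the sign in front, exactly s.zfill(N));
-- the [::-1] slice is List.reverse (PySem.List.slice?_none_none_neg_one).
-- A's per-number decoding loop: new_set = set(); for el, i in enumerate(...): if i == '1': new_set.add(el)
def pvDecodeA (conj number_neighs : Int) : List Int :=
  (pvEnum (PySem.Chars.zfill (PySem.Int.toBinChars conj) number_neighs).reverse).foldl
    (fun new_set p => if p.2 = '1' then PySem.Set.add new_set p.1 else new_set) []

def transform_numbers_to_sets (conj_forbidden : List Int) (number_neighs : Int) : List (List Int) :=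
  conj_forbidden.foldl
    (fun forbidden_conjs conj =>
      let new_set := pvDecodeA conj number_neighs
      -- 'for s in forbidden_conjs: if new_set.issubset(s): subset = True; break'
      if forbidden_conjs.any (fun s => PySem.Set.issubset new_set s) then forbidden_conjs
      else
        -- itertools.filterfalse(lambda x: x.issubset(new_set), forbidden_conjs) + append
        (forbidden_conjs.filter (fun x => !(PySem.Set.issubset x new_set))) ++ [new_set])
    []

-- ===== PORT B =====
-- B's set comprehension {el for el, i in enumerate(...) if i == '1'}
def pvDecodeB (conj number_neighs : Int) : List Int :=
  PySem.Set.ofList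
    (((pvEnum (PySem.Chars.zfill (PySem.Int.toBinChars conj) number_neighs).reverse).filter
        (fun p => p.2 == '1')).map (fun p => p.1))

def transform_numbers_to_sets_alt (conj_forbidden : List Int) (number_neighs : Int) : List (List Int) :=
  let sets := conj_forbidden.map (fun conj => pvDecodeB conj number_neighs)
  sets.foldl
    (fun result s =>
      -- 'if s not in result and not any(s < t for t in sets): result.append(s)'
      if !(result.any (fun r => PySem.Set.equal s r)) &&
         !(sets.any (fun t => PySem.Set.issubset s t && !(PySem.Set.issubset t s))) then
        result ++ [s]
      else result)
    []

-- ===== PRECONDITION & SPEC =====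
-- Pre_ excludes exactly the inputs on which A raises: a negative number_neighs makes the format
-- spec '0-Nb' invalid, so format() raises ValueError as soon as the loop body runs
-- (i.e. unless the list is empty).
def Pre_transform_numbers_to_sets (conj_forbidden : List Int) (number_neighs : Int) : Prop :=
  0 ≤ number_neighs ∨ conj_forbidden = []
instance (conj_forbidden : List Int) (number_neighs : Int) : Decidable (Pre_transform_numbers_to_sets conj_forbidden number_neighs) := by unfold Pre_transform_numbers_to_sets; infer_instance

def pvWitness_transform_numbers_to_sets : List Int × Int := ([6, 3, 5, 5, 1], 3)

def Spec_transform_numbers_to_sets (conj_forbidden : List Int) (number_neighs : Int) (out : List (List Int)) : Prop := out = transform_numbers_to_sets_alt conj_forbidden number_neighs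
instance (conj_forbidden : List Int) (number_neighs : Int) (out : List (List Int)) : Decidable (Spec_transform_numbers_to_sets conj_forbidden number_neighs out) := by unfold Spec_transform_numbers_to_sets; infer_instance

-- ===== CLAIM (what is proved, stated in full; the proofs are below) =====
def Claim_equal_transform_numbers_to_sets : Prop := ∀ (conj_forbidden : List Int) (number_neighs : Int), Dom_transform_numbers_to_sets conj_forbidden number_neighs → Pre_transform_numbers_to_sets conj_forbidden number_neighs → Spec_transform_numbers_to_sets conj_forbidden number_neighs (transform_numbers_to_sets conj_forbidden number_neighs)

-- ===== LEMMAS AND PROOFS =====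

-- pvEnum is Python's enumerate
theorem pvEnum_eq {α : Type} (l : List α) : pvEnum l = PySem.List.enumerate l := by
  simp [pvEnum, PySem.List.enumerate_eq_zipIdx_map]

-- abbreviations for the two fold steps (definitionally the ports' lambdas)
def pvStepA (acc : List (List Int)) (ns : List Int) : List (List Int) :=
  if acc.any (fun s => PySem.Set.issubset ns s) then acc
  else (acc.filter (fun x => !(PySem.Set.issubset x ns))) ++ [ns]

def pvMax (sets : List (List Int)) (s : List Int) : Bool :=
  !(sets.any (fun t => PySem.Set.issubset s t && !(PySem.Set.issubset t s)))

def pvStepB (sets : List (List Int)) (result : List (List Int)) (s : List Int) : List (List Int) :=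
  if !(result.any (fun r => PySem.Set.equal s r)) && pvMax sets s then result ++ [s] else result

-- the two decoders agree
theorem pvFoldAdd_if (l : List (Int × Char)) (acc : PySem.Set Int) :
    l.foldl (fun s p => if p.2 = '1' then PySem.Set.add s p.1 else s) acc
      = ((l.filter (fun p => p.2 == '1')).map (fun p => p.1)).foldl PySem.Set.add acc := by
  induction l generalizing acc with
  | nil => rfl
  | cons p l ih =>
      by_cases h : p.2 = '1' <;> simp [h, ih]

theorem pvDecode_eq (conj number_neighs : Int) :
    pvDecodeA conj number_neighs = pvDecodeB conj number_neighs := by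
  unfold pvDecodeA pvDecodeB
  simp only [pvEnum_eq]
  rw [pvFoldAdd_if, ← PySem.Set.ofList_eq_foldl]

-- decoded sets are strictly increasing lists
theorem pvDecodeB_pairwise (conj number_neighs : Int) :
    List.Pairwise (· < ·) (pvDecodeB conj number_neighs) := by
  unfold pvDecodeB
  rw [pvEnum_eq]
  have h2 : List.Pairwise (· < ·)
      (((PySem.List.enumerate (PySem.Chars.zfill (PySem.Int.toBinChars conj) number_neighs).reverse).filter
          (fun p => p.2 == '1')).map (fun p => p.1)) :=
    List.Pairwise.map _ (fun _ _ hab => hab)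
      ((PySem.List.pairwise_lt_enumerate _ 0).filter _)
  rw [PySem.Set.ofList_eq_self_of_nodup _ (h2.imp (fun h => ne_of_lt h))]
  exact h2

-- strictly increasing lists with the same members are equal
theorem pvCanonEq {a b : List Int} (ha : List.Pairwise (· < ·) a) (hb : List.Pairwise (· < ·) b)
    (h : ∀ x, x ∈ a ↔ x ∈ b) : a = b := by
  have hna : a.Nodup := ha.imp (fun h => ne_of_lt h)
  have hnb : b.Nodup := hb.imp (fun h => ne_of_lt h)
  exact List.Perm.eq_of_pairwise (fun x y _ _ h1 h2 => absurd h2 (not_lt.mpr h1.le)) ha hb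
    ((List.perm_ext_iff_of_nodup hna hnb).mpr h)

theorem pvSubAntisymm {a b : List Int} (ha : List.Pairwise (· < ·) a) (hb : List.Pairwise (· < ·) b)
    (h1 : PySem.Set.issubset a b = true) (h2 : PySem.Set.issubset b a = true) : a = b := by
  refine pvCanonEq ha hb (fun x => ⟨fun hx => ?_, fun hx => ?_⟩)
  · exact (PySem.Set.issubset_iff a b).mp h1 x hx
  · exact (PySem.Set.issubset_iff b a).mp h2 x hx

theorem pvSubRefl (a : List Int) : PySem.Set.issubset a a = true :=
  (PySem.Set.issubset_iff a a).mpr (fun _ hx => hx)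

theorem pvSubTrans {a b c : List Int} (h1 : PySem.Set.issubset a b = true)
    (h2 : PySem.Set.issubset b c = true) : PySem.Set.issubset a c = true :=
  (PySem.Set.issubset_iff a c).mpr
    (fun x hx => (PySem.Set.issubset_iff b c).mp h2 x ((PySem.Set.issubset_iff a b).mp h1 x hx))

-- strictly fewer strict supersets after stepping up
theorem pvCountLt {α : Type} (l : List α) (P Q : α → Bool) (himp : ∀ a ∈ l, Q a = true → P a = true)
    (t : α) (ht : t ∈ l) (hPt : P t = true) (hQt : Q t = false) :
    l.countP Q < l.countP P := by
  induction l with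
  | nil => cases ht
  | cons x l ih =>
      rcases List.mem_cons.mp ht with rfl | ht'
      · have h1 : l.countP Q ≤ l.countP P :=
          List.countP_mono_left (fun a ha hQ => himp a (List.mem_cons_of_mem _ ha) hQ)
        simp [hPt, hQt]
        omega
      · have h1 := ih (fun a ha hQ => himp a (List.mem_cons_of_mem _ ha) hQ) ht'
        have h2 : (if Q x then 1 else 0) ≤ (if P x then 1 else 0) := by
          by_cases hq : Q x = true
          · simp [hq, himp x (List.mem_cons_self) hq]
          · simp [Bool.eq_false_iff.mpr hq]
        simp only [List.countP_cons]
        omega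

-- completeness: every element of L has a maximal superset in L
theorem pvExistsMax (L : List (List Int)) (p : List Int) (hp : p ∈ L) :
    ∃ m ∈ L, pvMax L m = true ∧ PySem.Set.issubset p m = true := by
  have main : ∀ (n : Nat) (p : List Int), p ∈ L →
      L.countP (fun t => PySem.Set.issubset p t && !(PySem.Set.issubset t p)) ≤ n →
      ∃ m ∈ L, pvMax L m = true ∧ PySem.Set.issubset p m = true := by
    intro n
    induction n with
    | zero =>
        intro p hp hcnt
        by_cases hany : L.any (fun t => PySem.Set.issubset p t && !(PySem.Set.issubset t p)) = true
        · exfalso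
          obtain ⟨t, htL, hbt⟩ := List.any_eq_true.mp hany
          have : 0 < L.countP (fun t => PySem.Set.issubset p t && !(PySem.Set.issubset t p)) :=
            List.countP_pos_iff.mpr ⟨t, htL, hbt⟩
          omega
        · refine ⟨p, hp, ?_, pvSubRefl p⟩
          unfold pvMax
          rw [Bool.eq_false_iff.mpr hany]
          rfl
    | succ n ih =>
        intro p hp hcnt
        by_cases hany : L.any (fun t => PySem.Set.issubset p t && !(PySem.Set.issubset t p)) = true
        · obtain ⟨t, htL, hbt⟩ := List.any_eq_true.mp hany
          have hpt : PySem.Set.issubset p t = true := (Bool.and_eq_true_iff.mp hbt).1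
          have htp : PySem.Set.issubset t p = false :=
            (Bool.not_eq_true' _).mp (Bool.and_eq_true_iff.mp hbt).2
          have hlt : L.countP (fun u => PySem.Set.issubset t u && !(PySem.Set.issubset u t))
              < L.countP (fun u => PySem.Set.issubset p u && !(PySem.Set.issubset u p)) := by
            refine pvCountLt L _ _ ?_ t htL hbt ?_
            · intro a _ hQ
              have hta : PySem.Set.issubset t a = true := (Bool.and_eq_true_iff.mp hQ).1
              have hat : PySem.Set.issubset a t = false :=
                (Bool.not_eq_true' _).mp (Bool.and_eq_true_iff.mp hQ).2
              have hap : PySem.Set.issubset a p = false := by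
                by_contra hc
                have h' : PySem.Set.issubset a p = true := by
                  revert hc; cases PySem.Set.issubset a p <;> simp
                have h'' := pvSubTrans hta h'
                rw [htp] at h''
                exact Bool.noConfusion h''
              exact Bool.and_eq_true_iff.mpr ⟨pvSubTrans hpt hta, (Bool.not_eq_true' _).mpr hap⟩
            · rw [pvSubRefl t]
              rfl
          obtain ⟨m, hmL, hmmax, htm⟩ := ih t htL (by omega)
          exact ⟨m, hmL, hmmax, pvSubTrans hpt htm⟩
        · refine ⟨p, hp, ?_, pvSubRefl p⟩
          unfold pvMax
          rw [Bool.eq_false_iff.mpr hany]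
          rfl
  exact main _ p hp le_rfl

theorem pvOfListAppend (l : List (List Int)) (x : List Int) :
    PySem.Set.ofList (l ++ [x]) = PySem.Set.add (PySem.Set.ofList l) x := by
  simp [PySem.Set.ofList_eq_foldl, List.foldl_append]

-- ofList commutes with filter
theorem pvOfListFilter (l : List (List Int)) (c : List Int → Bool) :
    PySem.Set.ofList (l.filter c) = (PySem.Set.ofList l).filter c := by
  induction l using List.reverseRecOn with
  | nil => rfl
  | append_singleton l x ih =>
      rw [List.filter_append, pvOfListAppend]
      by_cases hc : c x = true
      · have hfx : List.filter c [x] = [x] := by simp [hc]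
        rw [hfx, pvOfListAppend, ih]
        by_cases hmem : x ∈ PySem.Set.ofList l
        · have hxl : x ∈ l := (PySem.Set.mem_ofList l x).mp hmem
          simp [PySem.Set.add, hxl, hc]
        · have hxl : x ∉ l := fun h => hmem ((PySem.Set.mem_ofList l x).mpr h)
          simp [PySem.Set.add, hxl, hc, List.filter_append]
      · have hfx : List.filter c [x] = [] := by simp [Bool.eq_false_iff.mpr hc]
        rw [hfx, List.append_nil, ih]
        by_cases hmem : x ∈ PySem.Set.ofList l
        · have hxl : x ∈ l := (PySem.Set.mem_ofList l x).mp hmem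
          simp [PySem.Set.add, hxl]
        · have hxl : x ∉ l := fun h => hmem ((PySem.Set.mem_ofList l x).mpr h)
          simp [PySem.Set.add, hxl, List.filter_append, Bool.eq_false_iff.mpr hc]

-- pvMax unfolded to its meaning
theorem pvMax_iff (L : List (List Int)) (m : List Int) :
    pvMax L m = true ↔
      ∀ t ∈ L, PySem.Set.issubset m t = true → PySem.Set.issubset t m = true := by
  unfold pvMax
  rw [Bool.not_eq_true', List.any_eq_false]
  constructor
  · intro h t ht hmt
    have hf := h t ht
    cases hc : PySem.Set.issubset t m with
    | true => rfl
    | false => rw [hmt, hc] at hf; exact absurd rfl hf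
  · intro h t ht
    cases hmt : PySem.Set.issubset m t with
    | false => simp
    | true => rw [h t ht hmt]; simp

theorem pvMaxAppend (P : List (List Int)) (s x : List Int) :
    pvMax (P ++ [s]) x
      = (pvMax P x && !(PySem.Set.issubset x s && !(PySem.Set.issubset s x))) := by
  unfold pvMax
  rw [List.any_append]
  simp

-- B's fold is "ofList of the maximal elements"
theorem pvFoldB (T L : List (List Int)) (res : List (List Int))
    (hL : ∀ s ∈ L, List.Pairwise (· < ·) s) (hres : ∀ r ∈ res, List.Pairwise (· < ·) r) :
    L.foldl (pvStepB T) res = (L.filter (pvMax T)).foldl PySem.Set.add res := by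
  induction L generalizing res hres with
  | nil => rfl
  | cons s L ih =>
      have hs : List.Pairwise (· < ·) s := hL s List.mem_cons_self
      have hL' : ∀ x ∈ L, List.Pairwise (· < ·) x := fun x hx => hL x (List.mem_cons_of_mem _ hx)
      have hany : (res.any (fun r => PySem.Set.equal s r)) = PySem.Set.contains res s := by
        by_cases hmem : s ∈ res
        · rw [(PySem.Set.contains_iff _ _).mpr hmem]
          exact List.any_eq_true.mpr ⟨s, hmem, by simp [PySem.Set.equal, pvSubRefl]⟩
        · rw [Bool.eq_false_iff.mpr (fun h => hmem ((PySem.Set.contains_iff _ _).mp h))]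
          refine Bool.eq_false_iff.mpr (fun h => ?_)
          obtain ⟨r, hr, heq⟩ := List.any_eq_true.mp h
          have : s = r := by
            refine pvCanonEq hs (hres r hr) (fun x => ?_)
            exact (PySem.Set.equal_iff s r).mp heq x
          exact hmem (this ▸ hr)
      have hstep : pvStepB T res s = if pvMax T s = true then PySem.Set.add res s else res := by
        unfold pvStepB
        rw [hany]
        cases hmx : pvMax T s with
        | false => simp
        | true =>
            cases hc : PySem.Set.contains res s with
            | true => simp [PySem.Set.add, (PySem.Set.contains_iff _ _).mp hc]
            | false =>
                have : s ∉ res := fun h => by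
                  rw [(PySem.Set.contains_iff _ _).mpr h] at hc; exact Bool.noConfusion hc
                simp [PySem.Set.add, this]
      rw [List.foldl_cons, hstep]
      cases hmx : pvMax T s with
      | true =>
          rw [List.filter_cons_of_pos hmx, List.foldl_cons, if_pos rfl]
          refine ih (PySem.Set.add res s) hL' (fun r hr => ?_)
          rcases (PySem.Set.mem_add res s r).mp hr with h | rfl
          · exact hres r h
          · exact hs
      | false =>
          rw [List.filter_cons_of_neg (by simp [hmx]), if_neg (by simp)]
          exact ih res hL' hres

-- A's fold computes the same list
theorem pvFoldA (L : List (List Int)) (hL : ∀ s ∈ L, List.Pairwise (· < ·) s) :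
    L.foldl pvStepA [] = PySem.Set.ofList (L.filter (pvMax L)) := by
  induction L using List.reverseRecOn with
  | nil => rfl
  | append_singleton P s ih =>
      have hP : ∀ x ∈ P, List.Pairwise (· < ·) x :=
        fun x hx => hL x (List.mem_append.mpr (Or.inl hx))
      have hs : List.Pairwise (· < ·) s := hL s (List.mem_append.mpr (Or.inr (by simp)))
      rw [List.foldl_append, ih hP, List.foldl_cons, List.foldl_nil]
      set acc := PySem.Set.ofList (P.filter (pvMax P)) with hacc
      have memacc : ∀ x, x ∈ acc ↔ x ∈ P ∧ pvMax P x = true := by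
        intro x; rw [hacc, PySem.Set.mem_ofList, List.mem_filter]
      unfold pvStepA
      by_cases h : (acc.any fun t => PySem.Set.issubset s t) = true
      · obtain ⟨m, hmacc, hsm⟩ := List.any_eq_true.mp h
        obtain ⟨hmP, hmmax⟩ := (memacc m).mp hmacc
        rw [if_pos h]
        have hfilP : P.filter (pvMax (P ++ [s])) = P.filter (pvMax P) := by
          apply List.filter_congr
          intro x hx
          rw [pvMaxAppend]
          cases hpx : pvMax P x with
          | false => simp
          | true =>
              suffices hsuf : (PySem.Set.issubset x s && !(PySem.Set.issubset s x)) = false by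
                simp [hsuf]
              cases hxs : PySem.Set.issubset x s with
              | false => simp
              | true =>
                  have hxm : PySem.Set.issubset x m = true := pvSubTrans hxs hsm
                  have hmx : PySem.Set.issubset m x = true := (pvMax_iff P x).mp hpx m hmP hxm
                  have hsx : PySem.Set.issubset s x = true := pvSubTrans hsm hmx
                  simp [hsx]
        rw [List.filter_append, hfilP]
        by_cases hms : PySem.Set.issubset m s = true
        · have hsm_eq : s = m := pvSubAntisymm hs (hP m hmP) hsm hms
          have hmaxs : pvMax (P ++ [s]) s = true := by
            rw [pvMaxAppend]
            have h1 : pvMax P s = true := hsm_eq ▸ hmmax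
            simp [h1, pvSubRefl]
          have hone : List.filter (pvMax (P ++ [s])) [s] = [s] := by simp [hmaxs]
          rw [hone, pvOfListAppend, ← hacc]
          have hmem : s ∈ acc := hsm_eq ▸ hmacc
          simp [PySem.Set.add, hmem]
        · have h1 : pvMax P s = false := by
            cases hq : pvMax P s with
            | false => rfl
            | true => exact absurd ((pvMax_iff P s).mp hq m hmP hsm) hms
          have hmaxs : pvMax (P ++ [s]) s = false := by
            rw [pvMaxAppend, h1]
            rfl
          have hone : List.filter (pvMax (P ++ [s])) [s] = [] := by simp [hmaxs]
          rw [hone, List.append_nil, ← hacc]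
      · rw [if_neg h]
        have hnosub : ∀ t ∈ P, PySem.Set.issubset s t = false := by
          intro t ht
          cases hst : PySem.Set.issubset s t with
          | false => rfl
          | true =>
              exfalso
              obtain ⟨m, hmP, hmmax, htm⟩ := pvExistsMax P t ht
              exact h (List.any_eq_true.mpr
                ⟨m, (memacc m).mpr ⟨hmP, hmmax⟩, pvSubTrans hst htm⟩)
        have hsnot : s ∉ P := fun hsP => by
          have hfalse := hnosub s hsP
          rw [pvSubRefl] at hfalse
          exact Bool.noConfusion hfalse
        have hmaxs : pvMax (P ++ [s]) s = true := by
          rw [pvMaxAppend]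
          have h1 : pvMax P s = true := (pvMax_iff P s).mpr (fun t ht hst => by
            rw [hnosub t ht] at hst; exact Bool.noConfusion hst)
          simp [h1, pvSubRefl]
        have hfilP : P.filter (pvMax (P ++ [s]))
            = (P.filter (pvMax P)).filter (fun x => !(PySem.Set.issubset x s)) := by
          rw [List.filter_filter]
          apply List.filter_congr
          intro x hx
          rw [pvMaxAppend, hnosub x hx]
          simp [Bool.and_comm]
        rw [List.filter_append, hfilP]
        have hone : List.filter (pvMax (P ++ [s])) [s] = [s] := by simp [hmaxs]
        rw [hone, pvOfListAppend, pvOfListFilter, ← hacc]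
        have hnot : s ∉ acc.filter (fun x => !(PySem.Set.issubset x s)) := fun hmem =>
          hsnot ((memacc s).mp (List.mem_filter.mp hmem).1).1
        simp [PySem.Set.add, hnot]

-- ===== VERDICT (by name: the statement is the Claim_ definition above) =====
theorem transform_numbers_to_sets_spec : Claim_equal_transform_numbers_to_sets := by
  intro cf w _ _
  unfold Spec_transform_numbers_to_sets
  have hA : transform_numbers_to_sets cf w
      = (cf.map (fun c => pvDecodeB c w)).foldl pvStepA [] := by
    unfold transform_numbers_to_sets pvStepA
    rw [List.foldl_map]
    simp only [pvDecode_eq]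
  have hB : transform_numbers_to_sets_alt cf w
      = (cf.map (fun c => pvDecodeB c w)).foldl (pvStepB (cf.map (fun c => pvDecodeB c w))) [] := by
    rfl
  set L := cf.map (fun c => pvDecodeB c w) with hLdef
  have hC : ∀ s ∈ L, List.Pairwise (· < ·) s := by
    intro s hs
    rw [hLdef] at hs
    obtain ⟨c, _, rfl⟩ := List.mem_map.mp hs
    exact pvDecodeB_pairwise c w
  rw [hA, hB, pvFoldA L hC, pvFoldB L L [] hC (by simp)]
  simp [PySem.Set.ofList_eq_foldl]
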